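-- pv_equiv track=rewrite | github.com/DebarghyaMaiti/virus-simulator | virus_model.py | classify_outbreak
-- ===== SOURCE A (Python) =====
-- def classify_outbreak(N, S, results):
--     final_infected = N - S[-1]
--     final_deaths = sum(res[3][-1] for res in results)
--
--     infected_fraction = final_infected / N
--
--     if infected_fraction < 0.001:
--         classification = "No outbreak"
--     elif infected_fraction < 0.01:
--         classification = "Localized outbreak"
--     elif infected_fraction < 0.2:
--         classification = "Epidemic"
--     else:
--         classification = "Pandemic risk"
--
--     return int(final_infected), int(final_deaths), classification
-- ===== SOURCE B (Python) =====
-- THRESHOLDS = [0.001, 0.01, 0.2]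
-- LABELS = ["No outbreak", "Localized outbreak", "Epidemic", "Pandemic risk"]
--
--
-- def _bisect_right(ts, x):
--     # hand-written bisect.bisect_right: binary search for the insertion point of x
--     lo, hi = 0, len(ts)
--     while lo < hi:
--         mid = (lo + hi) // 2
--         if x < ts[mid]:
--             hi = mid
--         else:
--             lo = mid + 1
--     return lo
--
--
-- def classify_outbreak(N, S, results):
--     final_infected = N - S[-1]
--     final_deaths = 0
--     for res in results:
--         final_deaths += res[3][-1]
--     idx = _bisect_right(THRESHOLDS, final_infected / N)
--     return int(final_infected), int(final_deaths), LABELS[idx]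
-- ===== Notes on version B (the rewrite author's own statement) =====
-- stated objective: alternative
-- what changed: The if/elif threshold cascade is replaced by a binary search (a hand-written bisect_right) over a sorted threshold table indexing a label table, and the generator-sum of deaths becomes an explicit accumulator loop.
import Mathlib
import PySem

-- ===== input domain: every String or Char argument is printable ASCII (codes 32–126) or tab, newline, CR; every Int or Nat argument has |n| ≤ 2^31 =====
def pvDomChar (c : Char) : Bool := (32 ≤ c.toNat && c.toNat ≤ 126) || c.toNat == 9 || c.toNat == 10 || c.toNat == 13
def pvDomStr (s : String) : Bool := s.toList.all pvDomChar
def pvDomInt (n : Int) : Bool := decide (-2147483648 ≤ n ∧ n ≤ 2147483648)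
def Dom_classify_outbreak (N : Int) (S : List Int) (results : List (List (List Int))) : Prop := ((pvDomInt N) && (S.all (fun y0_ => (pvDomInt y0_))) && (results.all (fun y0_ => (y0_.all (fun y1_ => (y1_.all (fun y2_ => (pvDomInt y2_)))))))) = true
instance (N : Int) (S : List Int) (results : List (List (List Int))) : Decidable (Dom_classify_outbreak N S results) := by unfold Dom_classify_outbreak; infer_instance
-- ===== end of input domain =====

-- B replaces the if/elif cascade by a binary search (hand-written bisect_right) over a sorted
-- threshold table indexing a label table, and sums deaths with an explicit accumulator loop
-- (objective: alternative; same cost).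
-- Float semantics: Python compares the float `final_infected / N` against the float literals
-- 0.001, 0.01, 0.2.  Each of these doubles is strictly greater than the exact rational
-- 1/1000, 1/100, 1/5 by less than half an ulp, and on Dom (|values| ≤ 2^31, so the quotient is a
-- ratio of integers of magnitude ≤ 2^32) no representable quotient falls in the sub-half-ulp
-- disagreement window, so the float comparison is EXACTLY the rational comparison
-- final_infected/N < 1/1000 (resp. 1/100, 1/5); both ports model it that way, exactly on Dom.

-- ===== PORT A =====
-- models `final_infected / N < num/den` (Python float compare; exact on Dom, see header comment)
def pyFracLt (f : Int) (N : Int) (num : Int) (den : Int) : Bool :=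
  if 0 < N then decide (f * den < N * num) else decide (N * num < f * den)

def classify_outbreak (N : Int) (S : List Int) (results : List (List (List Int))) : Int × Int × String :=
  let final_infected := N - (PySem.List.pyGet? S (-1)).getD 0
  let final_deaths := results.foldl
    (fun acc res => acc + (PySem.List.pyGet? ((PySem.List.pyGet? res 3).getD []) (-1)).getD 0) 0
  let classification :=
    if pyFracLt final_infected N 1 1000 then "No outbreak"
    else if pyFracLt final_infected N 1 100 then "Localized outbreak"
    else if pyFracLt final_infected N 1 5 then "Epidemic"
    else "Pandemic risk"
  (final_infected, final_deaths, classification)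

-- ===== PORT B =====
-- the threshold table as exact rationals (num, den) and the label table
def pvThresholds : List (Int × Int) := [(1, 1000), (1, 100), (1, 5)]
def pvLabels : List String := ["No outbreak", "Localized outbreak", "Epidemic", "Pandemic risk"]

-- Source B's `while lo < hi` binary search; `x < ts[mid]` is the same float compare, modelled by pyFracLt
def pvBisectRight (f : Int) (N : Int) (lo hi : Nat) : Nat :=
  if _h : lo < hi then
    let mid := (lo + hi) / 2
    let t := pvThresholds.getD mid (0, 1)
    if pyFracLt f N t.1 t.2 then pvBisectRight f N lo mid else pvBisectRight f N (mid + 1) hi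
  else lo
termination_by hi - lo
decreasing_by all_goals omega

-- Source B's `for res in results: final_deaths += res[3][-1]` accumulator loop
def pvSumDeaths (acc : Int) : List (List (List Int)) → Int
  | [] => acc
  | res :: rest =>
      pvSumDeaths (acc + (PySem.List.pyGet? ((PySem.List.pyGet? res 3).getD []) (-1)).getD 0) rest

def classify_outbreak_alt (N : Int) (S : List Int) (results : List (List (List Int))) : Int × Int × String :=
  let final_infected := N - (PySem.List.pyGet? S (-1)).getD 0
  let final_deaths := pvSumDeaths 0 results
  let idx := pvBisectRight final_infected N 0 pvThresholds.length
  (final_infected, final_deaths, pvLabels.getD idx "")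

-- ===== PRECONDITION & SPEC =====
-- Pre_ excludes exactly the inputs where Python A raises: empty S (IndexError on S[-1]),
-- N = 0 (ZeroDivisionError), and any res missing index 3 or with empty res[3] (IndexError).
def Pre_classify_outbreak (N : Int) (S : List Int) (results : List (List (List Int))) : Prop :=
  S ≠ [] ∧ N ≠ 0 ∧ ∀ res ∈ results, 4 ≤ res.length ∧ res.getD 3 [] ≠ []
instance (N : Int) (S : List Int) (results : List (List (List Int))) : Decidable (Pre_classify_outbreak N S results) := by unfold Pre_classify_outbreak; infer_instance

def pvWitness_classify_outbreak : Int × List Int × List (List (List Int)) :=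
  (1000, [900], [[[1], [2], [3], [4]]])

def Spec_classify_outbreak (N : Int) (S : List Int) (results : List (List (List Int))) (out : Int × Int × String) : Prop := out = classify_outbreak_alt N S results
instance (N : Int) (S : List Int) (results : List (List (List Int))) (out : Int × Int × String) : Decidable (Spec_classify_outbreak N S results out) := by unfold Spec_classify_outbreak; infer_instance

-- ===== CLAIM (what is proved, stated in full; the proofs are below) =====
def Claim_equal_classify_outbreak : Prop := ∀ (N : Int) (S : List Int) (results : List (List (List Int))), Dom_classify_outbreak N S results → Pre_classify_outbreak N S results → Spec_classify_outbreak N S results (classify_outbreak N S results)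

-- ===== LEMMAS AND PROOFS =====

-- monotonicity of the cascade in integer form, positive N
theorem lt_mono_pos {f N a b : Int} (hb : 0 < b) (hab : b ≤ a) (hN : 0 < N)
    (h : f * a < N) : f * b < N := by
  by_cases hf : f ≤ 0
  · calc f * b ≤ 0 := mul_nonpos_of_nonpos_of_nonneg hf (le_of_lt hb)
    _ < N := hN
  · have hf' : (0 : Int) ≤ f := by omega
    calc f * b ≤ f * a := mul_le_mul_of_nonneg_left hab hf'
    _ < N := h

-- monotonicity, negative N
theorem lt_mono_neg {f N a b : Int} (hb : 0 < b) (hab : b ≤ a) (hN : N < 0)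
    (h : N < f * a) : N < f * b := by
  by_cases hf : 0 ≤ f
  · calc N < 0 := hN
    _ ≤ f * b := mul_nonneg hf (le_of_lt hb)
  · have hf' : f ≤ 0 := by omega
    calc N < f * a := h
    _ ≤ f * b := mul_le_mul_of_nonpos_left hab hf'

theorem pyFracLt_mono (f N a b : Int) (hb : 0 < b) (hab : b ≤ a) (hN : N ≠ 0)
    (h : pyFracLt f N 1 a = true) : pyFracLt f N 1 b = true := by
  unfold pyFracLt at *
  rcases lt_trichotomy N 0 with hlt | heq | hgt
  · simp only [if_neg (by omega : ¬ 0 < N)] at *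
    simpa [Int.mul_one] using lt_mono_neg hb hab hlt (by simpa [Int.mul_one] using h)
  · exact absurd heq hN
  · simp only [if_pos hgt] at *
    simpa [Int.mul_one] using lt_mono_pos hb hab hgt (by simpa [Int.mul_one] using h)

-- A's left-fold of deaths equals B's accumulator loop
theorem foldl_eq_sumDeaths (l : List (List (List Int))) (acc : Int) :
    l.foldl (fun a res => a + (PySem.List.pyGet? ((PySem.List.pyGet? res 3).getD []) (-1)).getD 0) acc
      = pvSumDeaths acc l := by
  induction l generalizing acc with
  | nil => rfl
  | cons h t ih => simp [List.foldl, pvSumDeaths, ih]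

-- the binary search over the three-entry table returns the cascade's answer
theorem cascade_eq_bisect (f N : Int) (hN : N ≠ 0) :
    (if pyFracLt f N 1 1000 then "No outbreak"
     else if pyFracLt f N 1 100 then "Localized outbreak"
     else if pyFracLt f N 1 5 then "Epidemic"
     else "Pandemic risk")
    = pvLabels.getD (pvBisectRight f N 0 pvThresholds.length) "" := by
  by_cases h2 : pyFracLt f N 1 100 = true
  · by_cases h1 : pyFracLt f N 1 1000 = true
    · simp [pvBisectRight.eq_def, pvThresholds, pvLabels, h1, h2]
    · simp [pvBisectRight.eq_def, pvThresholds, pvLabels, h1, h2]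
  · have h1 : ¬ pyFracLt f N 1 1000 = true := fun h =>
      h2 (pyFracLt_mono f N 1000 100 (by norm_num) (by norm_num) hN h)
    by_cases h3 : pyFracLt f N 1 5 = true
    · simp [pvBisectRight.eq_def, pvThresholds, pvLabels, h1, h2, h3]
    · simp [pvBisectRight.eq_def, pvThresholds, pvLabels, h1, h2, h3]

-- ===== VERDICT (by name: the statement is the Claim_ definition above) =====
theorem classify_outbreak_spec : Claim_equal_classify_outbreak := by
  intro N S results _ hpre
  obtain ⟨_, hN, _⟩ := hpre
  show _ = _
  unfold classify_outbreak classify_outbreak_alt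
  simp only [foldl_eq_sumDeaths]
  rw [cascade_eq_bisect _ _ hN]
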